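-- pv_equiv track=rewrite | github.com/MinhNNM/python_code | tim_so_lon_nhat.py | so_max
-- ===== SOURCE A (Python) =====
-- def so_max(s):
--     res=0
--     a=[]
--     for i in s:
--         if i>='0' and i<='9':
--             res=res*10+int(i)
--         else:
--             res=0
--         a.append(res)
--     a.sort()
--     return a[len(a)-1]
-- ===== SOURCE B (Python) =====
-- def so_max(s):
--     best = 0
--     i = 0
--     n = len(s)
--     while i < n:
--         if '0' <= s[i] <= '9':
--             j = i
--             while j < n and '0' <= s[j] <= '9':
--                 j += 1
--             v = int(s[i:j])
--             if v > best:
--                 best = v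
--             i = j
--         else:
--             i += 1
--     return best
-- ===== Notes on version B (the rewrite author's own statement) =====
-- stated objective: simpler
-- what changed: A appends every running prefix value to a list, sorts it and takes the last element; B scans the string once over its digit runs keeping a running maximum, with no list and no sort.
-- crash fix: On the empty string A raises IndexError (it indexes into an empty list); B returns 0. — e.g. on so_max(""): A raises IndexError, B returns 0
import Mathlib
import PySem

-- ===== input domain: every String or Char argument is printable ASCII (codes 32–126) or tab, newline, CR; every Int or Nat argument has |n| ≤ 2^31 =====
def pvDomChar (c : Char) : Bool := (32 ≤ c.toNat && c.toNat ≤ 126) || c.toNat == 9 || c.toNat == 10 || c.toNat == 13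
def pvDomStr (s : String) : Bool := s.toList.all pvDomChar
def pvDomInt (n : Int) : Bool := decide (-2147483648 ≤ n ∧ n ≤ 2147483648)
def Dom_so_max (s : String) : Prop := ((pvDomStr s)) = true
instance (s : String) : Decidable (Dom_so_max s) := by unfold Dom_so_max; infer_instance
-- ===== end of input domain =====

-- B replaces A's build-running-values-list / sort / take-last pipeline with a single scan over
-- the digit runs of the string that keeps a running maximum (objective: simpler, no sort, no list).

-- ===== PORT A =====
-- literal transliteration of A: fold carrying (res, a); then a.sort(); a[len(a)-1].
-- int(i) on a single ASCII digit is exactly c.toNat - 48.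
def so_max (s : String) : Int :=
  let p := s.toList.foldl
    (fun (st : Int × List Int) c =>
      let res := if '0' ≤ c ∧ c ≤ '9' then st.1 * 10 + ((c.toNat : Int) - 48) else 0
      (res, st.2 ++ [res]))
    (0, [])
  let a := PySem.List.sorted p.2 (fun x => x)
  PySem.List.pyGetD a ((a.length : Int) - 1) 0

-- ===== PORT B =====
def pvIsDig (c : Char) : Bool := decide ('0' ≤ c) && decide (c ≤ '9')

-- int(s[i:j]) on a run of ASCII digits is exactly this fold (decimal accumulation).
def pvDigVal (res : Int) (ds : List Char) : Int :=
  ds.foldl (fun a c => a * 10 + ((c.toNat : Int) - 48)) res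

-- B's outer while-loop: advance over one non-digit, or consume a whole digit run at once.
def pvAltLoop : List Char → Int → Int
  | [], best => best
  | c :: rest, best =>
      if pvIsDig c then
        let v := pvDigVal 0 (c :: rest.takeWhile pvIsDig)
        pvAltLoop (rest.dropWhile pvIsDig) (if v > best then v else best)
      else pvAltLoop rest best
termination_by l _ => l.length
decreasing_by
  · exact Nat.lt_succ_of_le (List.length_dropWhile_le pvIsDig rest)
  · exact Nat.lt_succ_self _

def so_max_alt (s : String) : Int := pvAltLoop s.toList 0

-- ===== PRECONDITION & SPEC =====
-- On the empty string A indexes a[-1] of an empty list and raises IndexError; excluded.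
def Pre_so_max (s : String) : Prop := s ≠ ""
instance (s : String) : Decidable (Pre_so_max s) := by unfold Pre_so_max; infer_instance
def pvWitness_so_max : String := "ab12cd"

-- A raises IndexError on the empty string; B returns 0 there.
def Raises_so_max (s : String) : Prop := s = ""
instance (s : String) : Decidable (Raises_so_max s) := by unfold Raises_so_max; infer_instance
def pvRaiseWitness_so_max : String := ""
def pvRaiseWitnessOut_so_max : Int := 0

def Spec_so_max (s : String) (out : Int) : Prop := out = so_max_alt s
instance (s : String) (out : Int) : Decidable (Spec_so_max s out) := by unfold Spec_so_max; infer_instance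

-- ===== CLAIM (what is proved, stated in full; the proofs are below) =====
def Claim_equal_so_max : Prop := ∀ (s : String), Dom_so_max s → Pre_so_max s → Spec_so_max s (so_max s)
def Claim_raises_so_max : Prop := (∀ (s : String), Dom_so_max s → Raises_so_max s → ¬ Pre_so_max s) ∧ (Dom_so_max (pvRaiseWitness_so_max) ∧ Raises_so_max (pvRaiseWitness_so_max) ∧ so_max_alt (pvRaiseWitness_so_max) = pvRaiseWitnessOut_so_max)

-- ===== LEMMAS AND PROOFS =====

-- A's step and the list of running values A appends.
def pvStepA (res : Int) (c : Char) : Int :=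
  if '0' ≤ c ∧ c ≤ '9' then res * 10 + ((c.toNat : Int) - 48) else 0

def pvRunvals (res : Int) : List Char → List Int
  | [] => []
  | c :: cs => pvStepA res c :: pvRunvals (pvStepA res c) cs

theorem pvFoldA (cs : List Char) (res : Int) (acc : List Int) :
    (cs.foldl
      (fun (st : Int × List Int) c =>
        let r := if '0' ≤ c ∧ c ≤ '9' then st.1 * 10 + ((c.toNat : Int) - 48) else 0
        (r, st.2 ++ [r])) (res, acc)).2 = acc ++ pvRunvals res cs := by
  induction cs generalizing res acc with
  | nil => simp [pvRunvals]
  | cons c cs ih =>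
    simp only [List.foldl_cons]
    rw [ih]
    show (acc ++ [pvStepA res c]) ++ pvRunvals (pvStepA res c) cs = acc ++ pvRunvals res (c :: cs)
    rw [List.append_assoc]
    rfl

theorem pvDigitGe48 {c : Char} (h : '0' ≤ c) : (48 : Int) ≤ c.toNat := by
  have h2 : '0'.val ≤ c.val := h
  have h3 : '0'.val.toNat ≤ c.val.toNat := UInt32.le_iff_toNat_le.mp h2
  have h4 : (48 : Nat) ≤ c.toNat := by simpa using h3
  exact_mod_cast h4

theorem pvStepA_nonneg {res : Int} (h : 0 ≤ res) (c : Char) : 0 ≤ pvStepA res c := by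
  unfold pvStepA
  split
  · rename_i hd
    have := pvDigitGe48 hd.1
    nlinarith
  · exact le_refl 0

theorem pvRunvals_nonneg (cs : List Char) : ∀ res, 0 ≤ res → ∀ y ∈ pvRunvals res cs, 0 ≤ y := by
  induction cs with
  | nil => intro res _ y hy; simp [pvRunvals] at hy
  | cons c cs ih =>
    intro res hres y hy
    simp only [pvRunvals, List.mem_cons] at hy
    rcases hy with rfl | hy
    · exact pvStepA_nonneg hres c
    · exact ih _ (pvStepA_nonneg hres c) y hy

theorem pvRunvals_length (cs : List Char) : ∀ res, (pvRunvals res cs).length = cs.length := by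
  induction cs with
  | nil => intro res; simp [pvRunvals]
  | cons c cs ih => intro res; simp [pvRunvals, ih]

-- last element of sorted(a) equals the running max, for nonempty a of nonnegative values
theorem pvSortedLast (a : List Int) (hne : a ≠ []) (hnn : ∀ y ∈ a, 0 ≤ y) :
    PySem.List.pyGetD (PySem.List.sorted a (fun x => x))
      (((PySem.List.sorted a (fun x => x)).length : Int) - 1) 0 = a.foldl max 0 := by
  set m := PySem.List.sorted a (fun x => x) with hm
  have hlen : m.length = a.length := PySem.List.length_sorted a _ _
  have hpos : 0 < a.length := List.length_pos_iff.mpr hne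
  have hmlpos : 0 < m.length := by omega
  have h0 : (0 : Int) ≤ (m.length : Int) - 1 := by omega
  have h1 : (m.length : Int) - 1 < (m.length : Int) := by omega
  rw [PySem.List.pyGetD_eq_getElem m 0 h0 h1]
  have hidx : ((m.length : Int) - 1).toNat = m.length - 1 := by omega
  have hlt : m.length - 1 < m.length := by omega
  simp only [hidx]
  set x := m[m.length - 1]'hlt with hxdef
  have hxmem : x ∈ a := by
    rw [← PySem.List.mem_sorted a (fun y => y) false x]
    exact List.getElem_mem hlt
  apply le_antisymm
  · exact (PySem.List.le_foldl_max a 0).2 x hxmem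
  · rcases PySem.List.foldl_max_mem a 0 with h | h
    · rw [h]; exact hnn x hxmem
    · -- the max is some element of a, hence of m at some index p ≤ len-1
      have hmem : a.foldl max 0 ∈ m := (PySem.List.mem_sorted a (fun y => y) false _).mpr h
      obtain ⟨p, hp, hpe⟩ := List.getElem_of_mem hmem
      have := PySem.List.key_sorted_getElem_mono a (fun y => y) (p := p) (q := m.length - 1)
        (by omega) (by omega)
      simpa [← hm, hpe, hxdef] using this

theorem pvDigVal_ge (ds : List Char) : ∀ res, 0 ≤ res → (∀ c ∈ ds, pvIsDig c = true) →
    res ≤ pvDigVal res ds := by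
  induction ds with
  | nil => intro res _ _; simp [pvDigVal]
  | cons d ds ih =>
    intro res hres hds
    have hd : pvIsDig d = true := hds d (by simp)
    have hpair : '0' ≤ d ∧ d ≤ '9' := by simpa [pvIsDig] using hd
    have h48 : (48 : Int) ≤ d.toNat := pvDigitGe48 hpair.1
    have hstep : res ≤ res * 10 + ((d.toNat : Int) - 48) := by nlinarith
    have : res * 10 + ((d.toNat : Int) - 48) ≤ pvDigVal (res * 10 + ((d.toNat : Int) - 48)) ds :=
      ih _ (le_trans hres hstep) (fun c hc => hds c (by simp [hc]))
    calc res ≤ res * 10 + ((d.toNat : Int) - 48) := hstep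
      _ ≤ _ := this
      _ = pvDigVal res (d :: ds) := by simp [pvDigVal]

theorem pvStepA_of_dig {res : Int} {c : Char} (h : pvIsDig c = true) :
    pvStepA res c = res * 10 + ((c.toNat : Int) - 48) := by
  have := (by simpa [pvIsDig] using h : '0' ≤ c ∧ c ≤ '9')
  simp [pvStepA, this]

theorem pvRunvals_reset (rest : List Char) (v : Int)
    (h : rest = [] ∨ ∃ e es, rest = e :: es ∧ pvIsDig e = false) :
    pvRunvals v rest = pvRunvals 0 rest := by
  rcases h with rfl | ⟨e, es, rfl, he⟩
  · rfl
  · have hnd : ¬ ('0' ≤ e ∧ e ≤ '9') := by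
      intro hc; simp [pvIsDig, hc.1, hc.2] at he
    simp [pvRunvals, pvStepA, hnd]

-- one digit run: folding max through the run's running values = max'ing in the run's final value
theorem pvRunMax (ds : List Char) : ∀ rest' res best,
    (∀ c ∈ ds, pvIsDig c = true) → 0 ≤ res → ds ≠ [] →
    (rest' = [] ∨ ∃ e es, rest' = e :: es ∧ pvIsDig e = false) →
    (pvRunvals res (ds ++ rest')).foldl max best
      = (pvRunvals 0 rest').foldl max (max best (pvDigVal res ds)) := by
  induction ds with
  | nil => intro _ _ _ _ _ h _; exact absurd rfl h
  | cons d ds ih =>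
    intro rest' res best hds hres _ hrest
    have hd : pvIsDig d = true := hds d (by simp)
    have hpair : '0' ≤ d ∧ d ≤ '9' := by simpa [pvIsDig] using hd
    have h48 : (48 : Int) ≤ d.toNat := pvDigitGe48 hpair.1
    have hvnn : 0 ≤ res * 10 + ((d.toNat : Int) - 48) := by nlinarith
    have hstep : pvStepA res d = res * 10 + ((d.toNat : Int) - 48) := pvStepA_of_dig hd
    have hun : pvRunvals res ((d :: ds) ++ rest')
        = (res * 10 + ((d.toNat : Int) - 48))
            :: pvRunvals (res * 10 + ((d.toNat : Int) - 48)) (ds ++ rest') := by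
      rw [List.cons_append, pvRunvals, hstep]
    rw [hun, List.foldl_cons]
    have hdv : pvDigVal res (d :: ds) = pvDigVal (res * 10 + ((d.toNat : Int) - 48)) ds := rfl
    rcases ds with _ | ⟨d', ds'⟩
    · -- a run of a single digit
      rw [List.nil_append, pvRunvals_reset rest' _ hrest, hdv]
      simp [pvDigVal]
    · have hrec := ih rest' _ (max best (res * 10 + ((d.toNat : Int) - 48)))
        (fun c hc => hds c (by simp [hc])) hvnn (by simp) hrest
      rw [hrec, hdv]
      have hge : (res * 10 + ((d.toNat : Int) - 48))
          ≤ pvDigVal (res * 10 + ((d.toNat : Int) - 48)) (d' :: ds') :=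
        pvDigVal_ge (d' :: ds') _ hvnn (fun c hc => hds c (by simp [hc]))
      rw [max_assoc, max_eq_right hge]

theorem pvDropWhile_shape (p : Char → Bool) (l : List Char) :
    l.dropWhile p = [] ∨ ∃ e es, l.dropWhile p = e :: es ∧ p e = false := by
  induction l with
  | nil => left; rfl
  | cons c cs ih =>
    by_cases h : p c
    · simpa [h] using ih
    · right; exact ⟨c, cs, by simp [h], by simpa using h⟩

-- the running max over A's value list equals B's run-by-run loop
theorem pvBMax (n : Nat) : ∀ (L : List Char) best, L.length < n → 0 ≤ best →
    (pvRunvals 0 L).foldl max best = pvAltLoop L best := by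
  induction n with
  | zero => intro L _ h _; omega
  | succ n ih =>
    intro L best hlen hbest
    match L with
    | [] => simp [pvRunvals, pvAltLoop]
    | c :: cs =>
      by_cases hc : pvIsDig c = true
      · have hsplit : c :: cs = (c :: cs.takeWhile pvIsDig) ++ cs.dropWhile pvIsDig := by
          simp [List.takeWhile_append_dropWhile]
        have hall : ∀ x ∈ c :: cs.takeWhile pvIsDig, pvIsDig x = true := by
          intro x hx
          rcases List.mem_cons.mp hx with rfl | hx
          · exact hc
          · exact List.mem_takeWhile_imp hx
        have hrest := pvDropWhile_shape pvIsDig cs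
        set v := pvDigVal 0 (c :: cs.takeWhile pvIsDig) with hvd
        have hvnn : 0 ≤ v := le_trans (le_refl 0)
          (pvDigVal_ge _ 0 (le_refl 0) hall)
        have h1 : (pvRunvals 0 (c :: cs)).foldl max best
            = (pvRunvals 0 (cs.dropWhile pvIsDig)).foldl max (max best v) := by
          conv_lhs => rw [hsplit]
          exact pvRunMax (c :: cs.takeWhile pvIsDig) (cs.dropWhile pvIsDig) 0 best
            hall (le_refl 0) (by simp) hrest
        have hrl : (cs.dropWhile pvIsDig).length < n := by
          have := List.length_dropWhile_le pvIsDig cs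
          simp at hlen; omega
        have h2 := ih (cs.dropWhile pvIsDig) (max best v) hrl (le_trans hbest (le_max_left _ _))
        have hmax : (if v > best then v else best) = max best v := by
          by_cases h : v > best
          · simp [h, max_eq_right (le_of_lt h)]
          · simp [h, max_eq_left (not_lt.mp h)]
        rw [h1, h2]
        have hA : pvAltLoop (c :: cs) best
            = pvAltLoop (cs.dropWhile pvIsDig) (if v > best then v else best) := by
          simp [pvAltLoop, hc, ← hvd]
        rw [hA, hmax]
      · have hnd : ¬ ('0' ≤ c ∧ c ≤ '9') := by
          intro h; simp [pvIsDig, h.1, h.2] at hc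
        have : pvRunvals 0 (c :: cs) = 0 :: pvRunvals 0 cs := by
          simp [pvRunvals, pvStepA, hnd]
        rw [this]
        simp only [List.foldl_cons, max_eq_left hbest]
        have := ih cs best (by simp at hlen; omega) hbest
        rw [this]
        simp [pvAltLoop, hc]

-- ===== VERDICT (by name: the statement is the Claim_ definition above) =====
theorem so_max_spec : Claim_equal_so_max := by
  intro s _ hpre
  unfold Spec_so_max so_max so_max_alt
  have hne : s.toList ≠ [] := by
    intro hl
    exact hpre (String.toList_inj.mp (by simpa using hl))
  simp only [pvFoldA s.toList 0 [], List.nil_append]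
  have hrne : pvRunvals 0 s.toList ≠ [] := by
    intro h
    have := pvRunvals_length s.toList 0
    rw [h] at this
    exact hne (List.length_eq_zero_iff.mp this.symm)
  rw [pvSortedLast _ hrne (pvRunvals_nonneg s.toList 0 (le_refl 0))]
  exact pvBMax (s.toList.length + 1) s.toList 0 (by omega) (le_refl 0)

theorem so_max_raises : Claim_raises_so_max := by
  unfold Claim_raises_so_max
  refine ⟨fun s _ h hp => hp h, by decide, by decide, ?_⟩
  show pvAltLoop ("" : String).toList 0 = 0
  rw [show ("" : String).toList = [] from by decide]
  simp [pvAltLoop]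

-- self-check: at the raise witness the precondition indeed fails, so Claim_equal says nothing there
theorem pvRaiseWitness_excluded_ok : ¬ Pre_so_max pvRaiseWitness_so_max :=
  so_max_raises.1 pvRaiseWitness_so_max (by decide) (by decide)
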